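-- pv_equiv track=rewrite | github.com/akgoldberg/smooth_lottery | merit_baselines/misc/stackelberg_model.py | count_kt_permutations
-- ===== SOURCE A (Python) =====
-- def count_kt_permutations(n,D):
--     def count_kt_permutations_exact(n: int, D: int) -> int:
--         max_inversions = n * (n - 1) // 2
--         if D < 0 or D > max_inversions:
--             return 0
--
--         # dp[i] represents number of permutations with i inversions
--         dp = [0] * (D + 1)
--         dp[0] = 1  # Base case: identity permutation
--
--         for k in range(2, n+1):
--             new_dp = [0] * (k*(k-1)//2 + 1)
--             prefix = [0] * (len(dp) + 1)
--
--             # Compute prefix sums for previous dp array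
--             for i in range(len(dp)):
--                 prefix[i+1] = prefix[i] + dp[i]
--
--             # Calculate new counts using sliding window
--             for j in range(len(new_dp)):
--                 max_add = k - 1
--                 lower = max(0, j - max_add)
--                 upper = min(j, len(dp)-1)
--
--                 if lower > upper:
--                     new_dp[j] = 0
--                 else:
--                     new_dp[j] = prefix[upper+1] - prefix[lower]
--
--             # Update dp array and limit size to current maximum needed
--             current_max = k*(k-1)//2
--             dp = new_dp[:min(current_max, D)+1]
--
--         return dp[D] if D < len(dp) else 0
--
--     return sum(count_kt_permutations_exact(n, d) for d in range(D+1))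
-- ===== SOURCE B (Python) =====
-- def count_kt_permutations(n, D):
--     # Single inversion-table DP up to L = min(D, max_inversions), then sum the row.
--     if D < 0:
--         return 0
--     max_inv = n * (n - 1) // 2
--     L = min(D, max_inv)
--     dp = [1] + [0] * L
--     for k in range(2, n + 1):
--         m = min(k * (k - 1) // 2, L) + 1
--         new_dp = [0] * m
--         s = 0
--         for j in range(m):
--             if j < len(dp):
--                 s += dp[j]
--             if j - k >= 0:
--                 s -= dp[j - k]
--             new_dp[j] = s
--         dp = new_dp
--     return sum(dp)
-- ===== Notes on version B (the rewrite author's own statement) =====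
-- stated objective: faster
-- what changed: B runs the inversion-count DP once up to min(D, max_inversions) maintaining a rolling window sum and returns the sum of the final row, instead of A's re-running the whole prefix-sum DP from scratch for every d in range(D+1).
import Mathlib
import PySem

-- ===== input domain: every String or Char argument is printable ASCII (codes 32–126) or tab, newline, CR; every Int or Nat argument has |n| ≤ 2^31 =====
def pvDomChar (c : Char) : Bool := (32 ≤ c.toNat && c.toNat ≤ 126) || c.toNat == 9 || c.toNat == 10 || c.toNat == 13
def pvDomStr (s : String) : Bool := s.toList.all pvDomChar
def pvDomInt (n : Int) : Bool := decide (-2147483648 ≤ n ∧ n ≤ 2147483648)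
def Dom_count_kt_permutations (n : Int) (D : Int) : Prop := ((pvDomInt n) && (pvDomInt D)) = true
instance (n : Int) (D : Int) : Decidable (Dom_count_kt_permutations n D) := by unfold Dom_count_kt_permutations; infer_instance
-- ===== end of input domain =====

-- B re-runs the inversion-count DP once up to min(D, max_inversions) with a rolling window
-- and sums the final row, instead of A's re-running the whole prefix-sum DP for every d in range(D+1).

-- ===== PORT A =====
-- one iteration of the k-loop of count_kt_permutations_exact (d is the truncation bound)
def pvStepA (d : Int) (dp : List Int) (k : Int) : List Int :=
  let newLen := (PySem.Int.floordiv (k * (k - 1)) 2 + 1).toNat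
  -- prefix[i+1] = prefix[i] + dp[i]
  let pre := dp.foldl (fun pre x => pre ++ [pre.getLastD 0 + x]) ([0] : List Int)
  let newDp := (List.range newLen).map (fun (j : Nat) =>
    let maxAdd := k - 1
    let lower := max 0 ((j : Int) - maxAdd)
    let upper := min (j : Int) ((dp.length : Int) - 1)
    if lower > upper then 0
    else PySem.List.pyGetD pre (upper + 1) 0 - PySem.List.pyGetD pre lower 0)
  let currentMax := PySem.Int.floordiv (k * (k - 1)) 2
  PySem.List.slice newDp none (some (min currentMax d + 1))

-- inner function count_kt_permutations_exact(n, d)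
def pvExact (n : Int) (d : Int) : Int :=
  let maxInv := PySem.Int.floordiv (n * (n - 1)) 2
  if d < 0 ∨ d > maxInv then 0
  else
    let dp0 : List Int := (List.replicate (d + 1).toNat 0).set 0 1
    let dp := (PySem.List.pyRange 2 (n + 1) 1).foldl (pvStepA d) dp0
    if d < (dp.length : Int) then PySem.List.pyGetD dp d 0 else 0

def count_kt_permutations (n : Int) (D : Int) : Int :=
  (PySem.List.pyRange 0 (D + 1) 1).foldl (fun acc d => acc + pvExact n d) 0

-- ===== PORT B =====
-- one iteration of B's k-loop: rolling-window sum, row capped at min(k*(k-1)//2, L)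
def pvStepB (L : Int) (dp : List Int) (k : Int) : List Int :=
  let m := (min (PySem.Int.floordiv (k * (k - 1)) 2) L + 1).toNat
  ((List.range m).foldl (fun (st : Int × List Int) j =>
      let s1 := if j < dp.length then st.1 + PySem.List.pyGetD dp (j : Int) 0 else st.1
      let s2 := if (j : Int) - k ≥ 0 then s1 - PySem.List.pyGetD dp ((j : Int) - k) 0 else s1
      (s2, st.2 ++ [s2])) ((0 : Int), ([] : List Int))).2

def count_kt_permutations_alt (n : Int) (D : Int) : Int :=
  if D < 0 then 0
  else
    let maxInv := PySem.Int.floordiv (n * (n - 1)) 2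
    let L := min D maxInv
    let dp0 : List Int := 1 :: List.replicate L.toNat 0
    ((PySem.List.pyRange 2 (n + 1) 1).foldl (fun dp k => pvStepB L dp k) dp0).sum

-- ===== PRECONDITION & SPEC =====
def Spec_count_kt_permutations (n : Int) (D : Int) (out : Int) : Prop := out = count_kt_permutations_alt n D
instance (n : Int) (D : Int) (out : Int) : Decidable (Spec_count_kt_permutations n D out) := by unfold Spec_count_kt_permutations; infer_instance

-- ===== CLAIM (what is proved, stated in full; the proofs are below) =====
def Claim_equal_count_kt_permutations : Prop := ∀ (n : Int) (D : Int), Dom_count_kt_permutations n D → Spec_count_kt_permutations n D (count_kt_permutations n D)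

-- ===== LEMMAS AND PROOFS =====

-- pvF m j = number of permutations of (m+1) elements with j inversions
def pvF : Nat → Nat → Int
  | 0, j => if j = 0 then 1 else 0
  | m + 1, j => ∑ i ∈ Finset.Icc (j - (m + 1)) j, pvF m i

-- maximal number of inversions of a permutation of (m+1) elements
def pvCm (m : Nat) : Nat := m * (m + 1) / 2

-- invariant of both DP loops: dp rows hold pvF m, truncated within [min(cm,t)+1, t+1]
def pvGood (t m : Nat) (dp : List Int) : Prop :=
  (∀ (j : Nat) (h : j < dp.length), dp[j] = pvF m j) ∧
  min (pvCm m) t + 1 ≤ dp.length ∧ dp.length ≤ t + 1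

def pvShape (t m : Nat) : List Int := (List.range (min (pvCm m) t + 1)).map (pvF m)

-- window sum over a dp row (out-of-range entries read as 0)
def pvV (dp : List Int) (m j : Nat) : Int :=
  ∑ i ∈ Finset.Icc (j - (m + 1)) j, dp.getD i 0

lemma pvCm_two (m : Nat) : pvCm m * 2 = m * (m + 1) :=
  Nat.div_mul_cancel (Nat.even_mul_succ_self m).two_dvd

lemma pvCm_succ (m : Nat) : pvCm (m + 1) = pvCm m + (m + 1) := by
  have h1 := pvCm_two m
  have h2 := pvCm_two (m + 1)
  have h3 : (m + 1) * (m + 1 + 1) = m * (m + 1) + 2 * (m + 1) := by ring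
  omega

lemma pvF_eq_zero : ∀ (m j : Nat), pvCm m < j → pvF m j = 0 := by
  intro m
  induction m with
  | zero => intro j h; simp [pvF]; omega
  | succ m ih =>
    intro j h
    rw [pvCm_succ] at h
    simp only [pvF]
    apply Finset.sum_eq_zero
    intro i hi
    simp only [Finset.mem_Icc] at hi
    exact ih i (by omega)

lemma pvV_eq_F (t m : Nat) (dp : List Int) (h : pvGood t m dp) (j : Nat) (hj : j ≤ t) :
    pvV dp m j = pvF (m + 1) j := by
  obtain ⟨h1, h2, h3⟩ := h
  show _ = ∑ i ∈ Finset.Icc (j - (m + 1)) j, pvF m i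
  apply Finset.sum_congr rfl
  intro i hi
  simp only [Finset.mem_Icc] at hi
  by_cases hlt : i < dp.length
  · rw [List.getD_eq_getElem dp 0 hlt]; exact h1 i hlt
  · rw [List.getD_eq_default dp 0 (by omega)]
    rw [pvF_eq_zero m i (by omega)]

-- rolling-window transition
lemma pvV_succ (dp : List Int) (m c : Nat) (hc : 1 ≤ c) :
    pvV dp m c = pvV dp m (c - 1) + dp.getD c 0
      - (if m + 2 ≤ c then dp.getD (c - (m + 2)) 0 else 0) := by
  obtain ⟨c', rfl⟩ : ∃ c', c = c' + 1 := ⟨c - 1, by omega⟩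
  have key : ∀ a b : Nat, a ≤ b + 1 →
      ∑ i ∈ Finset.Icc a b, dp.getD i 0
        = ∑ i ∈ Finset.range (b + 1), dp.getD i 0 - ∑ i ∈ Finset.range a, dp.getD i 0 := by
    intro a b hab
    rw [← Finset.Ico_add_one_right_eq_Icc, Finset.sum_Ico_eq_sub _ hab]
  simp only [pvV, Nat.add_sub_cancel]
  rw [key _ _ (by omega), key _ _ (by omega)]
  rw [Finset.sum_range_succ (fun i => dp.getD i 0) (c' + 1)]
  by_cases hk : m + 2 ≤ c' + 1
  · rw [if_pos hk]
    rw [show (c' + 1) - (m + 1) = (c' - (m + 1)) + 1 from by omega]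
    rw [Finset.sum_range_succ (fun i => dp.getD i 0) (c' - (m + 1))]
    rw [show c' + 1 - (m + 2) = c' - (m + 1) from by omega]
    ring
  · rw [if_neg hk]
    rw [show (c' + 1) - (m + 1) = c' - (m + 1) from by omega]
    ring

lemma pvV_zero (dp : List Int) (m : Nat) : pvV dp m 0 = dp.getD 0 0 := by
  simp [pvV]

lemma pvShape_good (t m : Nat) : pvGood t m (pvShape t m) := by
  refine ⟨?_, ?_, ?_⟩
  · intro j hj
    simp [pvShape]
  · simp only [pvShape, List.length_map, List.length_range]; omega
  · simp only [pvShape, List.length_map, List.length_range]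
    omega

-- n*(n-1)//2 is the Nat triangle number (n ≥ 1)
lemma pvMaxInv_cast (n : Int) (h : 1 ≤ n) :
    PySem.Int.floordiv (n * (n - 1)) 2 = (pvCm (n - 1).toNat : Int) := by
  obtain ⟨M, hM⟩ : ∃ M : Nat, n = (M : Int) + 1 := ⟨(n - 1).toNat, by omega⟩
  subst hM
  have h1 : ((M : Int) + 1) * ((M : Int) + 1 - 1) = ((M * (M + 1) : Nat) : Int) := by
    push_cast; ring
  rw [h1, show ((M : Int) + 1 - 1) = (M : Int) from by ring]
  rw [PySem.Int.floordiv_eq_ediv_of_pos (by norm_num)]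
  rw [show ((2 : Int)) = ((2 : Nat) : Int) from rfl, ← Int.natCast_ediv]
  simp [pvCm]

lemma pvMaxInv_ge (n : Int) :
    (pvCm (n - 1).toNat : Int) ≤ PySem.Int.floordiv (n * (n - 1)) 2 := by
  by_cases h : 1 ≤ n
  · rw [pvMaxInv_cast n h]
  · have h0 : (n - 1).toNat = 0 := by omega
    rw [h0]
    have hnn : 0 ≤ n * (n - 1) := by nlinarith
    rw [PySem.Int.floordiv_eq_ediv_of_pos (by norm_num)]
    simpa [pvCm] using Int.ediv_nonneg hnn (by norm_num)

lemma pvCm_cast (m : Nat) :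
    PySem.Int.floordiv (((m : Int) + 2) * (((m : Int) + 2) - 1)) 2 = ((pvCm (m + 1) : Nat) : Int) := by
  have hx := pvMaxInv_cast ((m : Int) + 2) (by omega)
  rw [show ((m : Int) + 2 - 1).toNat = m + 1 from by omega] at hx
  exact hx

-- prefix list built by A's first inner loop
lemma pvPrefix_aux : ∀ (dp acc : List Int),
    dp.foldl (fun pre x => pre ++ [pre.getLastD 0 + x]) acc
      = acc ++ (List.range dp.length).map (fun i => acc.getLastD 0 + (dp.take (i + 1)).sum) := by
  intro dp
  induction dp with
  | nil => simp
  | cons x xs ih =>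
    intro acc
    simp only [List.foldl_cons]
    rw [ih]
    simp only [List.length_cons, List.range_succ_eq_map, List.map_cons, List.map_map,
      List.getLastD_concat, List.take_succ_cons, List.sum_cons, List.take_zero, List.sum_nil, add_zero]
    rw [List.append_cons acc]
    simp [add_assoc]

lemma pvPrefix_getD (dp : List Int) (i : Nat) (hi : i ≤ dp.length) :
    (dp.foldl (fun pre x => pre ++ [pre.getLastD 0 + x]) ([0] : List Int)).getD i 0
      = (dp.take i).sum := by
  rw [pvPrefix_aux]
  match i with
  | 0 => simp
  | (i + 1) =>
    rw [List.singleton_append, List.getD_cons_succ]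
    rw [List.getD_eq_getElem _ _ (by simpa using by omega)]
    simp

lemma pvSum_take (dp : List Int) (i : Nat) :
    (dp.take i).sum = ∑ r ∈ Finset.range i, dp.getD r 0 := by
  induction i with
  | zero => simp
  | succ i ih =>
    rw [Finset.sum_range_succ, ← ih]
    by_cases h : i < dp.length
    · rw [List.sum_take_succ dp i h, List.getD_eq_getElem dp 0 h]
    · rw [List.take_of_length_le (by omega), List.take_of_length_le (by omega),
        List.getD_eq_default dp 0 (by omega)]
      simp

lemma pvStepA_eq (t m : Nat) (dp : List Int) (h : pvGood t m dp) :
    pvStepA (t : Int) dp ((m : Int) + 2) = pvShape t (m + 1) := by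
  obtain ⟨h1, h2, h3⟩ := h
  have hlen1 : 1 ≤ dp.length := by omega
  have hsucc := pvCm_succ m
  unfold pvStepA
  simp only [pvCm_cast]
  rw [show (((pvCm (m + 1) : Nat) : Int) + 1).toNat = pvCm (m + 1) + 1 from by omega]
  rw [show (min ((pvCm (m + 1) : Nat) : Int) ((t : Nat) : Int) + 1)
        = (((min (pvCm (m + 1)) t + 1 : Nat)) : Int) from by push_cast; ring]
  rw [PySem.List.slice_to_natCast]
  rw [← List.map_take, List.take_range]
  rw [show min (min (pvCm (m + 1)) t + 1) (pvCm (m + 1) + 1) = min (pvCm (m + 1)) t + 1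
        from by omega]
  unfold pvShape
  apply List.map_congr_left
  intro j hj
  simp only [List.mem_range] at hj
  have hu : min ((j : Nat) : Int) ((dp.length : Int) - 1)
      = (((min j (dp.length - 1)) : Nat) : Int) := by omega
  have ha : max 0 ((j : Int) - (((m : Int) + 2) - 1)) = (((j - (m + 1) : Nat)) : Int) := by
    omega

  rw [ha, hu]
  rw [if_neg (by omega)]
  rw [show ((((min j (dp.length - 1)) : Nat)) : Int) + 1
        = (((min j (dp.length - 1)) + 1 : Nat) : Int) from by push_cast; ring]
  rw [PySem.List.pyGetD_natCast, PySem.List.pyGetD_natCast]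
  rw [pvPrefix_getD dp _ (by omega), pvPrefix_getD dp _ (by omega)]
  rw [pvSum_take, pvSum_take]
  rw [← Finset.sum_Ico_eq_sub _ (by omega)]
  rw [Finset.Ico_add_one_right_eq_Icc]
  have hV : ∑ i ∈ Finset.Icc (j - (m + 1)) (min j (dp.length - 1)), dp.getD i 0
      = pvV dp m j := by
    unfold pvV
    apply Finset.sum_subset (Finset.Icc_subset_Icc_right (by omega))
    intro i hi hni
    simp only [Finset.mem_Icc, not_and, not_le] at hi hni
    exact List.getD_eq_default dp 0 (by omega)
  rw [hV]
  exact pvV_eq_F t m dp ⟨h1, h2, h3⟩ j (by omega)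

lemma pvStepB_aux (dp : List Int) (m : Nat) : ∀ (c : Nat),
    (List.range c).foldl (fun (st : Int × List Int) j =>
      let s1 := if j < dp.length then st.1 + PySem.List.pyGetD dp (j : Int) 0 else st.1
      let s2 := if (j : Int) - ((m : Int) + 2) ≥ 0 then
        s1 - PySem.List.pyGetD dp ((j : Int) - ((m : Int) + 2)) 0 else s1
      (s2, st.2 ++ [s2])) ((0 : Int), ([] : List Int))
    = ((if c = 0 then 0 else pvV dp m (c - 1)), (List.range c).map (fun j => pvV dp m j)) := by
  intro c
  induction c with
  | zero => simp
  | succ c ih =>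
    rw [List.range_succ, List.foldl_append, ih]
    simp only [List.foldl_cons, List.foldl_nil, List.map_append, List.map_cons, List.map_nil,
      PySem.List.pyGetD_natCast]
    have hs2 : (if (c : Int) - ((m : Int) + 2) ≥ 0 then
        (if c < dp.length then (if c = 0 then 0 else pvV dp m (c - 1)) + dp.getD c 0
          else (if c = 0 then 0 else pvV dp m (c - 1)))
          - PySem.List.pyGetD dp ((c : Int) - ((m : Int) + 2)) 0
        else (if c < dp.length then (if c = 0 then 0 else pvV dp m (c - 1)) + dp.getD c 0
          else (if c = 0 then 0 else pvV dp m (c - 1)))) = pvV dp m c := by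
      have hgc : (if c < dp.length then (if c = 0 then 0 else pvV dp m (c - 1)) + dp.getD c 0
          else (if c = 0 then 0 else pvV dp m (c - 1)))
          = (if c = 0 then 0 else pvV dp m (c - 1)) + dp.getD c 0 := by
        by_cases hlen : c < dp.length
        · rw [if_pos hlen]
        · rw [if_neg hlen, List.getD_eq_default dp 0 (by omega), add_zero]
      rw [hgc]
      by_cases hc0 : c = 0
      · subst hc0
        rw [if_neg (by omega), if_pos rfl, pvV_zero, zero_add]
      · rw [if_neg hc0, pvV_succ dp m c (by omega)]
        by_cases hk : m + 2 ≤ c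
        · rw [if_pos (by omega), if_pos hk]
          rw [show ((c : Int) - ((m : Int) + 2)) = (((c - (m + 2) : Nat)) : Int) from by
            push_cast [hk]; ring]
          rw [PySem.List.pyGetD_natCast]
        · rw [if_neg (by omega), if_neg hk, sub_zero]
    rw [hs2]
    simp

lemma pvStepB_eq (t m : Nat) (dp : List Int) (h : pvGood t m dp) :
    pvStepB (t : Int) dp ((m : Int) + 2) = pvShape t (m + 1) := by
  unfold pvStepB
  simp only [pvCm_cast]
  rw [show (min ((pvCm (m + 1) : Nat) : Int) ((t : Nat) : Int) + 1).toNat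
        = min (pvCm (m + 1)) t + 1 from by omega]
  rw [pvStepB_aux dp m]
  unfold pvShape
  apply List.map_congr_left
  intro j hj
  simp only [List.mem_range] at hj
  exact pvV_eq_F t m dp h j (by omega)

lemma pvFold (step : List Int → Int → List Int) (t : Nat)
    (hstep : ∀ (m : Nat) (dp : List Int), pvGood t m dp → step dp ((m : Int) + 2) = pvShape t (m + 1)) :
    ∀ (c m : Nat) (dp : List Int), pvGood t m dp →
      (PySem.List.pyRange ((m : Int) + 2) ((m : Int) + 2 + ((c : Int) + 1)) 1).foldl step dp
        = pvShape t (m + 1 + c) := by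
  intro c
  induction c with
  | zero =>
    intro m dp h
    simp only [Nat.cast_zero]
    rw [show ((m : Int) + 2 + (0 + 1) : Int) = ((m : Int) + 2) + 1 by ring]
    rw [PySem.List.pyRange_one_singleton]
    simpa using hstep m dp h
  | succ c ih =>
    intro m dp h
    simp only [Nat.cast_add, Nat.cast_one]
    rw [PySem.List.pyRange_one_cons (by omega)]
    simp only [List.foldl_cons]
    rw [hstep m dp h]
    have h2 := ih (m + 1) (pvShape t (m + 1)) (pvShape_good t (m + 1))
    simp only [Nat.cast_add, Nat.cast_one] at h2
    have e1 : ((m : Int) + 2 + 1 : Int) = ((m : Int) + 1) + 2 := by ring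
    have e2 : ((m : Int) + 2 + ((c : Int) + 1 + 1) : Int) = ((m : Int) + 1) + 2 + ((c : Int) + 1) := by
      ring
    rw [e1, e2, h2]
    congr 1
    omega

-- characterization of A's inner function
lemma pvGood_dp0A (d : Int) (hd : 0 ≤ d) :
    pvGood d.toNat 0 ((List.replicate (d + 1).toNat 0).set 0 1) := by
  refine ⟨?_, ?_, ?_⟩
  · intro j hj
    simp only [List.length_set, List.length_replicate] at hj
    by_cases h0 : j = 0
    · subst h0
      rw [List.getElem_set_self (by simpa using by omega)]
      simp [pvF]
    · rw [List.getElem_set_ne (by omega), List.getElem_replicate]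
      simp [pvF, h0]
  · simp only [List.length_set, List.length_replicate]; omega
  · simp only [List.length_set, List.length_replicate]; omega

lemma pvExact_eq (n d : Int) (hd : 0 ≤ d) :
    pvExact n d = if d ≤ PySem.Int.floordiv (n * (n - 1)) 2
                  then pvF (n - 1).toNat d.toNat else 0 := by
  simp only [pvExact]
  by_cases hg : d > PySem.Int.floordiv (n * (n - 1)) 2
  · rw [if_pos (Or.inr hg), if_neg (by omega)]
  · rw [if_neg (show ¬(d < 0 ∨ d > PySem.Int.floordiv (n * (n - 1)) 2) from by omega)]
    rw [if_pos (show d ≤ PySem.Int.floordiv (n * (n - 1)) 2 from by omega)]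
    by_cases hn : n ≤ 1
    · -- loop body never runs (range(2, n+1) is empty)
      rw [PySem.List.pyRange_one_eq_nil (by omega)]
      simp only [List.foldl_nil]
      rw [PySem.List.pyGetD_eq_getElem _ _ hd
        (by simp only [List.length_set, List.length_replicate]; omega)]
      split_ifs with hif
      · rw [show (n - 1).toNat = 0 from by omega]
        obtain ⟨ho1, _, _⟩ := pvGood_dp0A d hd
        rw [ho1 d.toNat (by simp only [List.length_set, List.length_replicate]; omega)]
      · exfalso
        simp only [List.length_set, List.length_replicate] at hif
        omega
    · -- n ≥ 2: (n-1).toNat DP steps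
      obtain ⟨c0, rfl⟩ : ∃ c0 : Nat, n = (c0 : Int) + 2 := ⟨(n - 2).toNat, by omega⟩
      have hdt : d = ((d.toNat : Nat) : Int) := by omega
      have hfold := pvFold (pvStepA d) d.toNat
        (fun m dp hgood => by rw [hdt]; exact pvStepA_eq d.toNat m dp hgood)
        c0 0 ((List.replicate (d + 1).toNat 0).set 0 1) (pvGood_dp0A d hd)
      simp only [Nat.cast_zero, zero_add] at hfold
      rw [Nat.add_comm 1 c0] at hfold
      rw [show ((c0 : Int) + 2 + 1) = 2 + ((c0 : Int) + 1) from by ring]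
      rw [hfold]
      have hcm : PySem.Int.floordiv (((c0 : Int) + 2) * (((c0 : Int) + 2) - 1)) 2
          = ((pvCm (c0 + 1) : Nat) : Int) := pvCm_cast c0
      rw [hcm] at hg
      have ht : min (pvCm (c0 + 1)) d.toNat = d.toNat := by omega
      rw [PySem.List.pyGetD_eq_getElem _ _ hd
        (by simp only [pvShape, List.length_map, List.length_range, ht]; omega)]
      split_ifs with hif
      · rw [show ((c0 : Int) + 2 - 1).toNat = c0 + 1 from by omega]
        simp [pvShape]
      · exfalso
        simp only [pvShape, List.length_map, List.length_range, ht] at hif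
        omega

lemma pvExact_collapse (n : Int) (j : Nat) : pvExact n (j : Int) = pvF (n - 1).toNat j := by
  rw [pvExact_eq n (j : Int) (by omega)]
  by_cases h : (j : Int) ≤ PySem.Int.floordiv (n * (n - 1)) 2
  · rw [if_pos h]; simp
  · rw [if_neg h]
    have hge := pvMaxInv_ge n
    rw [pvF_eq_zero _ _ (by omega)]

lemma pvSumF0 (c : Nat) : ((List.range (c + 1)).map (pvF 0)).sum = 1 := by
  induction c with
  | zero => simp [pvF]
  | succ c ih =>
    rw [List.range_succ, List.map_append, List.sum_append, ih]
    simp [pvF]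

lemma pvSum_trunc (M a b : Nat) (h : a ≤ b) (hz : ∀ j, a ≤ j → j < b → pvF M j = 0) :
    ((List.range b).map (pvF M)).sum = ((List.range a).map (pvF M)).sum := by
  obtain ⟨k, rfl⟩ : ∃ k, b = a + k := ⟨b - a, by omega⟩
  rw [List.range_add, List.map_append, List.sum_append]
  have h0 : (List.map (pvF M) ((List.range k).map fun x => a + x)).sum = 0 := by
    apply List.sum_eq_zero
    intro x hx
    simp only [List.map_map, List.mem_map, List.mem_range, Function.comp_apply] at hx
    obtain ⟨i, hi, rfl⟩ := hx
    exact hz (a + i) (by omega) (by omega)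
  rw [h0, add_zero]

lemma pvGood_dp0B (t : Nat) : pvGood t 0 ((1 : Int) :: List.replicate t 0) := by
  refine ⟨?_, ?_, ?_⟩
  · intro j hj
    match j with
    | 0 => simp [pvF]
    | (j + 1) =>
      simp only [List.length_cons, List.length_replicate] at hj
      simp only [List.getElem_cons_succ, List.getElem_replicate]
      simp [pvF]
  · simp only [List.length_cons, List.length_replicate]; omega
  · simp only [List.length_cons, List.length_replicate]; omega

-- ===== VERDICT (by name: the statement is the Claim_ definition above) =====
theorem count_kt_permutations_spec : Claim_equal_count_kt_permutations := by
  intro n D _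
  simp only [Spec_count_kt_permutations, count_kt_permutations, count_kt_permutations_alt]
  by_cases hD : D < 0
  · rw [if_pos hD, PySem.List.pyRange_one_eq_nil (by omega)]
    simp
  · rw [if_neg hD]
    have hmaxge := pvMaxInv_ge n
    have hmax0 : 0 ≤ PySem.Int.floordiv (n * (n - 1)) 2 := le_trans (by positivity) hmaxge
    -- A side: sum of pvF (n-1).toNat over range(D+1)
    rw [PySem.List.foldl_add]
    rw [PySem.List.pyRange_one]
    rw [show ((D + 1 - 0 : Int)).toNat = D.toNat + 1 from by omega]
    simp only [List.map_map]
    have hA : (List.map (pvExact n ∘ fun k : Nat => (0 : Int) + (k : Int))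
        (List.range (D.toNat + 1))).sum
        = ((List.range (D.toNat + 1)).map (pvF (n - 1).toNat)).sum := by
      congr 1
      apply List.map_congr_left
      intro j _
      simp only [Function.comp_apply, zero_add]
      exact pvExact_collapse n j
    rw [hA, zero_add]
    by_cases hn : n ≤ 1
    · -- B's loop body never runs
      rw [PySem.List.pyRange_one_eq_nil (by omega)]
      simp only [List.foldl_nil, List.sum_cons, List.sum_replicate, smul_zero, add_zero]
      rw [show (n - 1).toNat = 0 from by omega, pvSumF0]
    · obtain ⟨c0, rfl⟩ : ∃ c0 : Nat, n = (c0 : Int) + 2 := ⟨(n - 2).toNat, by omega⟩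
      have hcm : PySem.Int.floordiv (((c0 : Int) + 2) * (((c0 : Int) + 2) - 1)) 2
          = ((pvCm (c0 + 1) : Nat) : Int) := pvCm_cast c0
      set L : Int := min D (PySem.Int.floordiv (((c0 : Int) + 2) * (((c0 : Int) + 2) - 1)) 2)
        with hL
      have hL0 : 0 ≤ L := by rw [hL]; omega
      have hLt : L = ((L.toNat : Nat) : Int) := by omega
      have hfold := pvFold (fun dp k => pvStepB L dp k) L.toNat
        (fun m dp hgood => by rw [hLt]; exact pvStepB_eq L.toNat m dp hgood)
        c0 0 ((1 : Int) :: List.replicate L.toNat 0) (pvGood_dp0B L.toNat)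
      simp only [Nat.cast_zero, zero_add] at hfold
      rw [Nat.add_comm 1 c0] at hfold
      rw [show ((c0 : Int) + 2 + 1) = 2 + ((c0 : Int) + 1) from by ring]
      rw [hfold]
      -- both sides are partial sums of the pvF (c0+1) row
      have hM : ((c0 : Int) + 2 - 1).toNat = c0 + 1 := by omega
      rw [hM]
      have htcm : L.toNat ≤ pvCm (c0 + 1) := by rw [hcm] at hL; omega
      have ht' : min (pvCm (c0 + 1)) L.toNat = L.toNat := by omega
      unfold pvShape
      rw [ht']
      rw [pvSum_trunc (c0 + 1) (L.toNat + 1) (D.toNat + 1) (by rw [hL]; omega)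
        (fun j hj1 hj2 => pvF_eq_zero _ _ (by rw [hcm] at hL; omega))]
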